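-- pv_equiv track=rewrite | github.com/WeldingTJU/DataScience | prase/html_table_parse.py | join_table
-- ===== SOURCE A (Python) =====
-- def join_table(parts):
--     if len(parts) <= 1:
--         return parts
--     merged = [parts[0]]
--     for tb in parts[1:]:
--         last = merged[-1]
--         if (len(tb['head']) == len(last['head'])
--                 and len(tb['body']) == len(last['body'])):
--             for r in range(len(tb['head'])):
--                 last['head'][r].extend(tb['head'][r])
--             for r in range(len(tb['body'])):
--                 last['body'][r].extend(tb['body'][r])
--         else:
--             merged.append(tb)
--     return merged
-- ===== SOURCE B (Python) =====
-- def join_table(parts):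
--     if len(parts) <= 1:
--         return parts
--     # phase 1: split parts into consecutive runs of tables with equal dimensions
--     runs = [[parts[0]]]
--     for t in parts[1:]:
--         leader = runs[-1][0]
--         if (len(t['head']), len(t['body'])) == (len(leader['head']), len(leader['body'])):
--             runs[-1].append(t)
--         else:
--             runs.append([t])
--     # phase 2: fold every run into its leader, gluing paired rows
--     out = []
--     for run in runs:
--         leader = run[0]
--         for tb in run[1:]:
--             for row, extra in zip(leader['head'], tb['head']):
--                 row.extend(extra)
--             for row, extra in zip(leader['body'], tb['body']):
--                 row.extend(extra)
--         out.append(leader)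
--     return out
-- ===== Notes on version B (the rewrite author's own statement) =====
-- stated objective: alternative
-- what changed: A's single streaming pass that compares each table with the last merged accumulator entry and extends its rows via indexed range loops is replaced by a two-phase decomposition: first split parts into consecutive runs of equal (head,body) dimensions, then fold each run into its leader gluing paired rows with zip.
import Mathlib
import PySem

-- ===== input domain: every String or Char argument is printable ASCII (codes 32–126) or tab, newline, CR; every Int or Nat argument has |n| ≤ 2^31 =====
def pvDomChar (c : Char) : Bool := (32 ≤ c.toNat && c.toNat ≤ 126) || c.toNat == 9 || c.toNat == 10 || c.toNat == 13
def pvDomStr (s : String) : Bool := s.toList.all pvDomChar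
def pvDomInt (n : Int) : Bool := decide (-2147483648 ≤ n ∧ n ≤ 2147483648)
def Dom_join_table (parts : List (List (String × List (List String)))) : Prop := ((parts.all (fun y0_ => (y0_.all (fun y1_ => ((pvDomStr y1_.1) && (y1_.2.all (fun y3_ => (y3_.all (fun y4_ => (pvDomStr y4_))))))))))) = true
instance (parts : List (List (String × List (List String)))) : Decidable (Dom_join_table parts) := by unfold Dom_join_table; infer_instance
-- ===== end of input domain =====

-- B replaces A's streaming "compare with the last merged table" accumulator by a two-phase
-- group-into-runs-then-fold-each-run decomposition (zip over paired rows instead of indexed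
-- range loops); alternative decomposition, same cost.  Python A mutates the row lists of
-- parts[0] / each run leader in place; B performs the same mutations, and the equivalence
-- proved here is about the RETURN value.

-- a table: a Python dict, as an insertion-ordered association list
abbrev JT : Type := List (String × List (List String))

-- dict lookup t[k]; KeyError (k absent) is excluded by Pre_, [] is the off-domain default
def jtGet (t : JT) (k : String) : List (List String) :=
  match t with
  | [] => []
  | (k', v) :: rest => if k' == k then v else jtGet rest k

-- in-place mutation of the list object stored at key k (present under Pre_; no-op off-domain)
def jtUpd (t : JT) (k : String) (f : List (List String) → List (List String)) : JT :=
  match t with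
  | [] => []
  | (k', v) :: rest => if k' == k then (k', f v) :: rest else (k', v) :: jtUpd rest k f

-- ===== PORT A =====
-- 'for r in range(len(tb_rows)): last_rows[r].extend(tb_rows[r])' (indices in range under the guard)
def aExtendRows (last tb : List (List String)) : List (List String) :=
  (PySem.List.pyRange 0 (tb.length : Int) 1).foldl
    (fun acc r => acc.set r.toNat (acc.getD r.toNat [] ++ tb.getD r.toNat [])) last

-- A's loop body; state = (merged[:-1] reversed, merged[-1])
def aStep (st : List JT × JT) (tb : JT) : List JT × JT :=
  let (accRev, last) := st
  if (jtGet tb "head").length == (jtGet last "head").length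
      && (jtGet tb "body").length == (jtGet last "body").length then
    (accRev,
      jtUpd (jtUpd last "head" (fun h => aExtendRows h (jtGet tb "head"))) "body"
        (fun b => aExtendRows b (jtGet tb "body")))
  else (last :: accRev, tb)

def join_table (parts : List (List (String × List (List String)))) : List (List (String × List (List String))) :=
  if parts.length ≤ 1 then parts
  else
    match parts with
    | [] => parts
    | p :: rest =>
      let st := rest.foldl aStep ([], p)
      (st.2 :: st.1).reverse

-- ===== PORT B =====
def bDims (t : JT) : Nat × Nat := ((jtGet t "head").length, (jtGet t "body").length)

-- fold one table of a run into the run's leader, gluing paired rows (zip)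
def bMerge (leader tb : JT) : JT :=
  jtUpd (jtUpd leader "head" (fun h => List.zipWith (· ++ ·) h (jtGet tb "head"))) "body"
    (fun b => List.zipWith (· ++ ·) b (jtGet tb "body"))

-- phase-1 loop body; state = (finished runs reversed, current run's leader, its tail reversed)
def bGroup (st : List (JT × List JT) × JT × List JT) (t : JT) : List (JT × List JT) × JT × List JT :=
  let (doneRev, leader, tailRev) := st
  if bDims t == bDims leader then (doneRev, leader, t :: tailRev)
  else ((leader, tailRev.reverse) :: doneRev, t, [])

def join_table_alt (parts : List (List (String × List (List String)))) : List (List (String × List (List String))) :=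
  if parts.length ≤ 1 then parts
  else
    match parts with
    | [] => parts
    | p :: rest =>
      let st := rest.foldl bGroup ([], p, [])
      let runs := ((st.2.1, st.2.2.reverse) :: st.1).reverse
      runs.map (fun r => r.2.foldl bMerge r.1)

-- ===== PRECONDITION & SPEC =====
-- Pre_ excludes exactly the inputs on which Python A raises KeyError: two or more tables and
-- some table missing the 'head' or 'body' key (Python B raises there too).
def Pre_join_table (parts : List (List (String × List (List String)))) : Prop :=
  parts.length ≤ 1 ∨
    ∀ t ∈ parts, t.any (fun p => p.1 == "head") = true ∧ t.any (fun p => p.1 == "body") = true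
instance (parts : List (List (String × List (List String)))) : Decidable (Pre_join_table parts) := by unfold Pre_join_table; infer_instance

def pvWitness_join_table : (List (List (String × List (List String)))) :=
  [[("head", [["a"]]), ("body", [])], [("head", [["b"]]), ("body", [])]]

def Spec_join_table (parts : List (List (String × List (List String)))) (out : List (List (String × List (List String)))) : Prop := out = join_table_alt parts
instance (parts : List (List (String × List (List String)))) (out : List (List (String × List (List String)))) : Decidable (Spec_join_table parts out) := by unfold Spec_join_table; infer_instance

-- ===== CLAIM (what is proved, stated in full; the proofs are below) =====
def Claim_equal_join_table : Prop := ∀ (parts : List (List (String × List (List String)))), Dom_join_table parts → Pre_join_table parts → Spec_join_table parts (join_table parts)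

-- ===== LEMMAS AND PROOFS =====

-- A's indexed extend loop, from index k on, appends row-wise (the guard makes lengths equal)
lemma extend_go (T : List (List String)) :
    ∀ (n k : Nat) (h : List (List String)), T.length - k = n → k ≤ T.length → h.length = T.length →
    (PySem.List.pyRange (k : Int) (T.length : Int) 1).foldl
      (fun acc r => acc.set r.toNat (acc.getD r.toNat [] ++ T.getD r.toNat [])) h
    = h.take k ++ List.zipWith (· ++ ·) (h.drop k) (T.drop k) := by
  intro n
  induction n with
  | zero =>
    intro k h hn hk hl
    have hk' : k = T.length := by omega
    subst hk'
    rw [PySem.List.pyRange_one_eq_nil (le_refl _)]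
    simp [List.drop_eq_nil_of_le, hl.le, List.take_of_length_le hl.le]
  | succ n ih =>
    intro k h hn hk hl
    have hklt : k < T.length := by omega
    have hkh : k < h.length := by omega
    rw [PySem.List.pyRange_one_cons (by exact_mod_cast hklt)]
    simp only [List.foldl_cons, Int.toNat_natCast]
    have hcast : ((k : Int) + 1) = (((k + 1 : Nat)) : Int) := by push_cast; ring
    rw [hcast, ih (k + 1) _ (by omega) (by omega) (by simp [hl])]
    have hgh : h.getD k [] = h[k] := List.getD_eq_getElem h [] hkh
    have hgT : T.getD k [] = T[k] := List.getD_eq_getElem T [] hklt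
    rw [hgh, hgT, List.set_eq_take_cons_drop _ hkh,
        List.drop_eq_getElem_cons hkh, List.drop_eq_getElem_cons hklt]
    have hlen : (h.take k).length = k := by simp; omega
    simp [List.take_append, List.drop_append, hlen, List.take_take,
      List.drop_eq_nil_of_le]
    rw [List.drop_eq_getElem_cons hkh, List.drop_eq_getElem_cons hklt]
    simp [List.zipWith]

lemma extend_eq (h T : List (List String)) (hl : h.length = T.length) :
    aExtendRows h T = List.zipWith (· ++ ·) h T := by
  have := extend_go T T.length 0 h (by omega) (by omega) hl
  simpa [aExtendRows] using this

lemma jtGet_upd_ne (t : JT) (k k' : String) (f : List (List String) → List (List String))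
    (hne : k' ≠ k) : jtGet (jtUpd t k f) k' = jtGet t k' := by
  induction t with
  | nil => rfl
  | cons p rest ih =>
    obtain ⟨a, v⟩ := p
    by_cases h : a = k <;> by_cases h' : a = k' <;>
      simp_all [jtGet, jtUpd]

lemma jtGet_upd_self (t : JT) (k : String) (f : List (List String) → List (List String)) :
    jtGet (jtUpd t k f) k = f (jtGet t k) ∨
      (jtGet (jtUpd t k f) k = [] ∧ jtGet t k = []) := by
  induction t with
  | nil => right; exact ⟨rfl, rfl⟩
  | cons p rest ih =>
    obtain ⟨a, v⟩ := p
    by_cases h : a = k <;> simp_all [jtGet, jtUpd]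

lemma jtUpd_congr (t : JT) (k : String) (f g : List (List String) → List (List String))
    (h : f (jtGet t k) = g (jtGet t k)) : jtUpd t k f = jtUpd t k g := by
  induction t with
  | nil => rfl
  | cons p rest ih =>
    obtain ⟨a, v⟩ := p
    by_cases ha : a = k <;> simp_all [jtGet, jtUpd]

-- under the guard, A's merge is B's merge
lemma merge_eq (last tb : JT)
    (hh : (jtGet tb "head").length = (jtGet last "head").length)
    (hb : (jtGet tb "body").length = (jtGet last "body").length) :
    jtUpd (jtUpd last "head" (fun h => aExtendRows h (jtGet tb "head"))) "body"
      (fun b => aExtendRows b (jtGet tb "body")) = bMerge last tb := by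
  unfold bMerge
  have h1 : jtUpd last "head" (fun h => aExtendRows h (jtGet tb "head"))
      = jtUpd last "head" (fun h => List.zipWith (· ++ ·) h (jtGet tb "head")) :=
    jtUpd_congr _ _ _ _ (extend_eq _ _ hh.symm)
  rw [h1]
  apply jtUpd_congr
  rw [jtGet_upd_ne _ _ _ _ (show "body" ≠ "head" by decide)]
  exact extend_eq _ _ hb.symm

-- a zip-extend update keeps the length of the value at its key
lemma len_upd_zip (t : JT) (k : String) (u : List (List String))
    (h : u.length = (jtGet t k).length) :
    (jtGet (jtUpd t k (fun x => List.zipWith (· ++ ·) x u)) k).length = (jtGet t k).length := by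
  rcases jtGet_upd_self t k (fun x => List.zipWith (· ++ ·) x u) with h1 | ⟨h1, h2⟩
  · rw [h1]; simp [List.length_zipWith]; omega
  · rw [h1, h2]

-- merging under the guard does not change a table's dimensions
lemma dims_merge (last tb : JT)
    (hh : (jtGet tb "head").length = (jtGet last "head").length)
    (hb : (jtGet tb "body").length = (jtGet last "body").length) :
    bDims (bMerge last tb) = bDims last := by
  unfold bDims bMerge
  have e1 : jtGet (jtUpd (jtUpd last "head" (fun h => List.zipWith (· ++ ·) h (jtGet tb "head")))
      "body" (fun b => List.zipWith (· ++ ·) b (jtGet tb "body"))) "head"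
      = jtGet (jtUpd last "head" (fun h => List.zipWith (· ++ ·) h (jtGet tb "head"))) "head" :=
    jtGet_upd_ne _ _ _ _ (show "head" ≠ "body" by decide)
  have e2 : jtGet (jtUpd last "head" (fun h => List.zipWith (· ++ ·) h (jtGet tb "head"))) "body"
      = jtGet last "body" := jtGet_upd_ne _ _ _ _ (show "body" ≠ "head" by decide)
  rw [e1, len_upd_zip last "head" _ hh,
      len_upd_zip (jtUpd last "head" (fun h => List.zipWith (· ++ ·) h (jtGet tb "head")))
        "body" (jtGet tb "body") (by rw [e2]; exact hb), e2]

-- phase 2 on one run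
def bFin (r : JT × List JT) : JT := r.2.foldl bMerge r.1

-- the loop invariant: from related states, A's fold and B's fold produce the same merged list
lemma loop_eq (rest : List JT) :
    ∀ (accRev : List JT) (last : JT) (doneRev : List (JT × List JT)) (leader : JT)
      (tailRev : List JT),
    last = tailRev.reverse.foldl bMerge leader →
    bDims last = bDims leader →
    accRev = doneRev.map bFin →
    (rest.foldl aStep (accRev, last)).2 :: (rest.foldl aStep (accRev, last)).1
      = (((rest.foldl bGroup (doneRev, leader, tailRev)).2.1,
          (rest.foldl bGroup (doneRev, leader, tailRev)).2.2.reverse) ::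
          (rest.foldl bGroup (doneRev, leader, tailRev)).1).map bFin := by
  induction rest with
  | nil =>
    intro accRev last doneRev leader tailRev h1 h2 h3
    simp [bFin, h1, h3]
  | cons tb rest ih =>
    intro accRev last doneRev leader tailRev h1 h2 h3
    simp only [List.foldl_cons]
    by_cases hg : (jtGet tb "head").length = (jtGet last "head").length ∧
        (jtGet tb "body").length = (jtGet last "body").length
    · have hga : aStep (accRev, last) tb
          = (accRev, jtUpd (jtUpd last "head" (fun h => aExtendRows h (jtGet tb "head"))) "body"
              (fun b => aExtendRows b (jtGet tb "body"))) := by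
        simp [aStep, hg.1, hg.2]
      have hgb : bGroup (doneRev, leader, tailRev) tb = (doneRev, leader, tb :: tailRev) := by
        have : bDims tb = bDims leader := by
          rw [← h2]; unfold bDims; rw [hg.1, hg.2]
        simp [bGroup, this]
      rw [hga, hgb, merge_eq last tb hg.1 hg.2]
      apply ih
      · rw [h1]; simp [List.foldl_append]
      · rw [dims_merge last tb hg.1 hg.2]; exact h2
      · exact h3
    · have hga : aStep (accRev, last) tb = (last :: accRev, tb) := by
        rcases not_and_or.mp hg with h | h <;> simp [aStep, h]
      have hgb : bGroup (doneRev, leader, tailRev) tb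
          = ((leader, tailRev.reverse) :: doneRev, tb, []) := by
        have : ¬ bDims tb = bDims leader := by
          rw [← h2]; unfold bDims
          intro he
          exact hg ⟨congrArg Prod.fst he, congrArg Prod.snd he⟩
        simp [bGroup, this]
      rw [hga, hgb]
      apply ih
      · rfl
      · rfl
      · simp [bFin, ← h1, h3]

-- ===== VERDICT (by name: the statement is the Claim_ definition above) =====
theorem join_table_spec : Claim_equal_join_table := by
  intro parts _ _
  show join_table parts = join_table_alt parts
  unfold join_table join_table_alt
  by_cases hlen : parts.length ≤ 1
  · simp [hlen]
  · match parts with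
    | [] => simp at hlen
    | p :: rest =>
      simp only [if_neg hlen]
      have h := loop_eq rest [] p [] p [] rfl rfl rfl
      rw [List.map_reverse,
        show (fun r : JT × List JT => List.foldl bMerge r.1 r.2) = bFin from rfl, ← h]
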